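-- pv_equiv track=rewrite | github.com/XuuRee/python-data-structures | 02 Binary search/binary_search.py | find_first_greater
-- ===== SOURCE A (Python) =====
-- def find_first_greater(key, numbers):
--     """
--     vstup: 'key' hodnota hledaneho cisla, 'numbers' serazene pole cisel
--     vystup: index prvniho vyskytu prvku vetsiho nez hodnota 'key',
--             -1, pokud tam zadny takovy prvek neni
--     casova slozitost: O(log n), kde 'n' je pocet prvku pole 'numbers'
--     """
--     low = 0
--     high = len(numbers)
--     while low < high:
--         mid = (low + high) // 2
--         if key < numbers[mid]:
--             high = mid
--         else:
--             low = mid + 1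
--     if low >= len(numbers):
--         return -1
--     return low
-- ===== SOURCE B (Python) =====
-- def find_first_greater(key, numbers):
--     """Divide-and-conquer on slices: return offset of first element > key in
--     the segment, combining offsets; -1 if no such element."""
--     def go(seg):
--         if not seg:
--             return 0
--         mid = len(seg) // 2
--         if key < seg[mid]:
--             return go(seg[:mid])
--         return mid + 1 + go(seg[mid + 1:])
--     r = go(numbers)
--     return -1 if r == len(numbers) else r
-- ===== Notes on version B (the rewrite author's own statement) =====
-- stated objective: alternative
-- what changed: Replaces the iterative low/high-pointer loop with a recursive divide-and-conquer over list slices that combines relative offsets; the trailing guard becomes an equality test justified by a proved bound on the result.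
import Mathlib
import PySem

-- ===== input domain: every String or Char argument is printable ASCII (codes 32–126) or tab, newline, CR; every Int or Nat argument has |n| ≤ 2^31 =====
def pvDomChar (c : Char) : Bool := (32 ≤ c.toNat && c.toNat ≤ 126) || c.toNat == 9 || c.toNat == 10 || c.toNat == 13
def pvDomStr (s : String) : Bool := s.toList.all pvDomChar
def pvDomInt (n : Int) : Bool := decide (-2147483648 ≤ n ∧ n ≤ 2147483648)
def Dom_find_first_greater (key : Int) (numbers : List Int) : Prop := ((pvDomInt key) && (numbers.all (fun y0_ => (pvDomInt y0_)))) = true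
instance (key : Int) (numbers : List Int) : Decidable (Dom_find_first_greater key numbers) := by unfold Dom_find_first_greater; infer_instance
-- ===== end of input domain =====

-- B replaces the iterative low/high binary-search loop by a recursive divide-and-conquer
-- over list slices combining relative offsets (objective: alternative decomposition).


-- ===== PORT A =====
-- the while-loop of A, state (low, high); numbers[mid] is always in range here,
-- so pyGetD with default 0 computes exactly Python's numbers[mid]
def ffgLoop (key : Int) (numbers : List Int) (low high : Int) : Int :=
  if _h : low < high then
    let mid := PySem.Int.floordiv (low + high) 2
    if key < PySem.List.pyGetD numbers mid 0 then
      ffgLoop key numbers low mid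
    else
      ffgLoop key numbers (mid + 1) high
  else low
termination_by (high - low).toNat
decreasing_by
  · have := PySem.Int.floordiv_two_mid_bounds (le_of_lt _h)
    have hlt : PySem.Int.floordiv (low + high) 2 < high := by
      rw [PySem.Int.floordiv_lt_iff_lt_mul (by norm_num)]; omega
    omega
  · have := PySem.Int.floordiv_two_mid_bounds (le_of_lt _h)
    omega

def find_first_greater (key : Int) (numbers : List Int) : Int :=
  let low := ffgLoop key numbers 0 (numbers.length : Int)
  if low ≥ (numbers.length : Int) then -1 else low

-- ===== PORT B =====
-- Source B's recursive helper go(seg): empty → 0; else split at mid = len(seg)//2,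
-- recurse on seg[:mid] or on seg[mid+1:] adding the offset mid+1
def ffgGo (key : Int) (seg : List Int) : Int :=
  if _h : seg = [] then 0
  else
    let mid : Nat := seg.length / 2
    if key < PySem.List.pyGetD seg (mid : Int) 0 then
      ffgGo key (PySem.List.slice seg none (some (mid : Int)))
    else
      (mid : Int) + 1 + ffgGo key (PySem.List.slice seg (some ((mid : Int) + 1)) none)
termination_by seg.length
decreasing_by
  · rw [PySem.List.slice_to_natCast]
    have : seg.length ≠ 0 := fun h => _h (List.eq_nil_of_length_eq_zero h)
    simp [List.length_take]; omega
  · have h1 : ((mid : Int) + 1) = ((mid + 1 : Nat) : Int) := by push_cast; ring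
    rw [h1, PySem.List.slice_from_natCast]
    have : seg.length ≠ 0 := fun h => _h (List.eq_nil_of_length_eq_zero h)
    simp [List.length_drop]; omega

def find_first_greater_alt (key : Int) (numbers : List Int) : Int :=
  let r := ffgGo key numbers
  if r = (numbers.length : Int) then -1 else r

-- ===== PRECONDITION & SPEC =====
def Spec_find_first_greater (key : Int) (numbers : List Int) (out : Int) : Prop := out = find_first_greater_alt key numbers
instance (key : Int) (numbers : List Int) (out : Int) : Decidable (Spec_find_first_greater key numbers out) := by unfold Spec_find_first_greater; infer_instance

-- ===== CLAIM (what is proved, stated in full; the proofs are below) =====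
def Claim_equal_find_first_greater : Prop := ∀ (key : Int) (numbers : List Int), Dom_find_first_greater key numbers → Spec_find_first_greater key numbers (find_first_greater key numbers)

-- ===== LEMMAS AND PROOFS =====

-- go's result is bounded by the segment length (so A's '≥ len' guard is B's '= len')
theorem ffgGo_bounds (key : Int) (seg : List Int) :
    0 ≤ ffgGo key seg ∧ ffgGo key seg ≤ (seg.length : Int) := by
  induction seg using ffgGo.induct key with
  | case1 => simp [ffgGo]
  | case2 seg h mid hlt ih =>
    have hmid : mid = seg.length / 2 := rfl
    rw [hmid] at hlt ih
    have hne : seg.length ≠ 0 := fun h0 => h (List.eq_nil_of_length_eq_zero h0)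
    rw [ffgGo]
    simp only [dif_neg h]
    rw [if_pos hlt]
    rw [PySem.List.slice_to_natCast] at ih ⊢
    have hlen : (seg.take (seg.length / 2)).length = seg.length / 2 := by
      simp [List.length_take]; omega
    rw [hlen] at ih
    have hm : seg.length / 2 ≤ seg.length := by omega
    refine ⟨ih.1, le_trans ih.2 (by exact_mod_cast hm)⟩
  | case3 seg h mid hlt ih =>
    have hmid : mid = seg.length / 2 := rfl
    rw [hmid] at hlt ih
    have hne : seg.length ≠ 0 := fun h0 => h (List.eq_nil_of_length_eq_zero h0)
    rw [ffgGo]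
    simp only [dif_neg h]
    rw [if_neg hlt]
    have h1 : ((seg.length / 2 : Nat) : Int) + 1 = ((seg.length / 2 + 1 : Nat) : Int) := by
      push_cast; ring
    rw [h1, PySem.List.slice_from_natCast] at ih ⊢
    have hlen : (seg.drop (seg.length / 2 + 1)).length = seg.length - (seg.length / 2 + 1) := by
      simp [List.length_drop]
    rw [hlen] at ih
    obtain ⟨ih1, ih2⟩ := ih
    constructor
    · push_cast; omega
    · push_cast at ih2 ⊢; omega

-- the loop on window [lo, hi) equals lo plus go on the slice numbers[lo:hi]
theorem ffgLoop_eq_go (key : Int) (numbers : List Int) (k lo hi : Nat)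
    (hk : hi - lo ≤ k) (hle : lo ≤ hi) (hhi : hi ≤ numbers.length) :
    ffgLoop key numbers (lo : Int) (hi : Int) =
      (lo : Int) + ffgGo key ((numbers.drop lo).take (hi - lo)) := by
  induction k generalizing lo hi with
  | zero =>
    have heq : lo = hi := by omega
    subst heq
    rw [ffgLoop]
    simp [ffgGo]
  | succ k ih =>
    by_cases hcase : lo < hi
    · -- loop body fires
      rw [ffgLoop]
      have hcI : (lo : Int) < (hi : Int) := by exact_mod_cast hcase
      simp only [dif_pos hcI]
      have hcast : (lo : Int) + (hi : Int) = ((lo + hi : Nat) : Int) := by push_cast; ring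
      rw [hcast]
      have hfd : PySem.Int.floordiv ((lo + hi : Nat) : Int) 2 = (((lo + hi) / 2 : Nat) : Int) := by
        exact_mod_cast PySem.Int.floordiv_natCast (lo + hi) 2
      rw [hfd]
      set m : Nat := (lo + hi) / 2 with hm
      have hmlo : lo ≤ m := by omega
      have hmhi : m < hi := by omega
      -- unfold go on the segment
      set seg : List Int := (numbers.drop lo).take (hi - lo) with hseg
      have hseglen : seg.length = hi - lo := by
        simp [hseg, List.length_take, List.length_drop]; omega
      have hsegne : seg ≠ [] := by
        intro h0; rw [h0] at hseglen; simp at hseglen; omega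
      rw [ffgGo]
      simp only [dif_neg hsegne]
      rw [hseglen]
      have hmB : (hi - lo) / 2 = m - lo := by omega
      rw [hmB]
      -- the inspected element is the same in both programs
      have helem : PySem.List.pyGetD seg ((m - lo : Nat) : Int) 0 =
          PySem.List.pyGetD numbers ((m : Nat) : Int) 0 := by
        have hlt1 : m - lo < seg.length := by omega
        have hlt2 : m < numbers.length := by omega
        rw [PySem.List.pyGetD_natCast, PySem.List.pyGetD_natCast]
        rw [List.getD_eq_getElem _ _ hlt1, List.getD_eq_getElem _ _ hlt2]
        simp only [hseg, List.getElem_take, List.getElem_drop]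
        congr 1
        omega
      rw [helem]
      by_cases hkey : key < PySem.List.pyGetD numbers ((m : Nat) : Int) 0
      · simp only [if_pos hkey]
        rw [PySem.List.slice_to_natCast]
        have hA := ih lo m (by omega) (by omega) (by omega)
        rw [hA]
        have htt : seg.take (m - lo) = (numbers.drop lo).take (m - lo) := by
          rw [hseg, List.take_take]
          congr 1
          omega
        rw [htt]
      · simp only [if_neg hkey]
        have h1 : ((m : Int) + 1) = ((m + 1 : Nat) : Int) := by push_cast; ring
        rw [h1]
        have h2 : ((m - lo : Nat) : Int) + 1 = ((m - lo + 1 : Nat) : Int) := by push_cast; omega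
        rw [h2, PySem.List.slice_from_natCast]
        have hA := ih (m + 1) hi (by omega) (by omega) (by omega)
        rw [hA]
        have hsegdrop : seg.drop (m - lo + 1) = (numbers.drop (m + 1)).take (hi - (m + 1)) := by
          rw [hseg, List.drop_take, List.drop_drop]
          congr 1
          · omega
          · congr 1
            omega
        rw [hsegdrop]
        push_cast
        omega
    · -- loop exits immediately: lo = hi
      have heq : lo = hi := by omega
      subst heq
      rw [ffgLoop]
      simp [ffgGo]

-- ===== VERDICT (by name: the statement is the Claim_ definition above) =====
theorem find_first_greater_spec : Claim_equal_find_first_greater := by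
  intro key numbers _
  unfold Spec_find_first_greater find_first_greater find_first_greater_alt
  have h0 : (0 : Int) = ((0 : Nat) : Int) := by norm_num
  have hmain := ffgLoop_eq_go key numbers numbers.length 0 numbers.length
    (by omega) (by omega) (le_refl _)
  simp only [Nat.cast_zero, Nat.sub_zero, List.drop_zero, List.take_length, zero_add] at hmain
  rw [hmain]
  have hb := ffgGo_bounds key numbers
  by_cases h : ffgGo key numbers = (numbers.length : Int)
  · simp [h]
  · have : ¬ ffgGo key numbers ≥ (numbers.length : Int) := by omega
    simp [h, this]
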